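-- pv_equiv track=rewrite | github.com/ShihaoWang/Contact-Transition-Tree | Terrain_Fun.py | Face_Unification_SubSub
-- ===== SOURCE A (Python) =====
-- def Face_Unification_SubSub(Face_Vertices, Triangle_Vertices):
--     # This function is used to unifiy the Triangle_Vertices into Face_Vertices if there exists a shared boundary edge
--     # Compare the same element in two lists
--     Face_Vertices_Tuple = [tuple(t) for t in Face_Vertices]
--     Triangle_Vertices_Tuple = [tuple(t) for t in Triangle_Vertices]
--
--     shared_element_tuples = list(set(Face_Vertices_Tuple).intersection(Triangle_Vertices_Tuple))
--     shared_element_lists = [list(elem) for elem in shared_element_tuples]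
--
--     cmp_rest = False
--     if len(shared_element_lists)<2:
--         return False, Face_Vertices
--     else:
--         # This means that there are at least two overlapping elements between these two lists
--         # Therefore, it is needed to unify them together to reduce the unnecessary effort in figuring out the triangle mesh
--         # The Face_Vertices is a reference list which remains to be unchanged. However, we would like to first change the order of Triangle_Vertices to match the shared elements in Face_Vertices
--
--         Face_Shift_Res, Face_Vertices_Shifted = Face_List_Reording(Face_Vertices, shared_element_lists)
--         Tria_Shift_Res, Triangle_Vertices_Shifted = Face_List_Reording(Triangle_Vertices, shared_element_lists)
--
--         # Then the job is very straightforward, which is to import the 1st coordinate from the triangle vertices into the Face_Vertices to finish this unification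
--         Face_Vertices_Shifted.append(Face_Vertices_Shifted[-1])
--         Face_Vertices_Shifted[-2] = Triangle_Vertices_Shifted[0]
--         return True, Face_Vertices_Shifted
--
-- def Face_List_Reording(face_list, shared_elements):
--     # This function is used to reorder the list to make sure that the shared elements will be at the last two element of the whole list
--     # We have already known that the face vertices are ordered in a counter-clockwise order
--     # The shared elements are in the face_list, the main idea is to shift the face_list's order such that the shared elements rest in the last two spots.
--     Element_Number = len(face_list)
--     i = 0
--     face_list_ref = face_list[:]
--     # print face_list_ref
--     while i < Element_Number:
--         List_Shift2Left(face_list_ref, 1)       # One to the left at each steps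
--         # print face_list_ref
--         face_cmp_elements = face_list_ref[-2:]                  # Get the last two elements out
--         # print face_cmp_elements
--         # print shared_elements
--         face_shared_elements = [x for x in face_cmp_elements if x in shared_elements]
--         # print face_shared_elements
--         if len(face_shared_elements) == 2:
--             # In this case, the list should output a successful value
--             return True, face_list_ref
--         else:
--             # In this case, the list should be further shifted
--             i = i + 1
--     return False, face_list_ref
--
-- def List_Shift2Left(list_i, n):
--     """
--     Shifts the lst over by n indices
--     """
--     if n < 0:
--         raise ValueError('n must be a positive integer')
--     if n > 0:
--         list_i_first_element = list_i.pop(0)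
--         list_i.append(list_i_first_element)
--         List_Shift2Left(list_i, n-1)  # repea
-- ===== SOURCE B (Python) =====
-- def Face_Unification_SubSub(Face_Vertices, Triangle_Vertices):
--     # Direct slice-rotation/index logic instead of the recursive pop-based shifting helpers.
--     shared = set(map(tuple, Face_Vertices)) & set(map(tuple, Triangle_Vertices))
--     if len(shared) < 2:
--         return False, Face_Vertices
--
--     def reorder(lst):
--         # smallest shift k in 1..N putting two shared vertices in the last two slots;
--         # k = N (the original order) when no shift succeeds
--         n = len(lst)
--         for k in range(1, n + 1):
--             r = lst[k:] + lst[:k]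
--             if tuple(r[-1]) in shared and tuple(r[-2]) in shared:
--                 return r
--         return lst[:]
--
--     f = reorder(Face_Vertices)
--     t = reorder(Triangle_Vertices)
--     return True, f[:-1] + [t[0], f[-1]]
-- ===== Notes on version B (the rewrite author's own statement) =====
-- stated objective: simpler
-- what changed: Replaces the recursive pop-and-append shifting helper and the while-loop-with-counter reordering by direct slice rotations lst[k:]+lst[:k] tried for k=1..N with a plain last-two-membership test, and builds the merged face in one expression f[:-1]+[t[0],f[-1]] instead of append-then-overwrite.
import Mathlib
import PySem

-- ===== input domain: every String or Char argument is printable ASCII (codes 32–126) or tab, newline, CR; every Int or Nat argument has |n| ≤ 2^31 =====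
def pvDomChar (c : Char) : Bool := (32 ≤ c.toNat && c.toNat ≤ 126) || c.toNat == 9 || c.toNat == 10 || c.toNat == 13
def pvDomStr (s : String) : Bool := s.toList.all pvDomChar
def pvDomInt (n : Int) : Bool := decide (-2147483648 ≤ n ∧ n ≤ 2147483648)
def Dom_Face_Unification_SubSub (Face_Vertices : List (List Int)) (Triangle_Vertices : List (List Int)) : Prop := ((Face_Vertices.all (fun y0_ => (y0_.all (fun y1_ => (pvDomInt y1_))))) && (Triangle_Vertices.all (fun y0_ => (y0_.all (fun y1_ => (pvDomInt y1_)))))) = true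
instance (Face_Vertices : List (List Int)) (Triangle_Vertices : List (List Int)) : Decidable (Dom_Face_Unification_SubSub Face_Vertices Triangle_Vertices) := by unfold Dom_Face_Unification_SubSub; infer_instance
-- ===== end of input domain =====

-- B replaces A's recursive pop-based shifting and counter-driven while loop by direct slice
-- rotations lst[k:]+lst[:k] tried for k = 1..N, and builds the merged face in one expression
-- (objective: simpler). Equivalence of the RETURN value; neither program mutates its arguments.

-- ===== PORT A =====
-- List_Shift2Left(list_i, 1): pop(0) then append (the n-recursion bottoms out after one step).
-- pop(0) on [] would raise in Python; A only ever shifts nonempty lists, so the [] case is unreachable.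
def pvShift1 (l : List (List Int)) : List (List Int) :=
  match l with
  | [] => []
  | x :: xs => xs ++ [x]

-- Face_List_Reording's while loop: fuel = Element_Number - i, state = face_list_ref
def pvReordLoop (shared : List (List Int)) : Nat → List (List Int) → Bool × List (List Int)
  | 0, ref => (false, ref)
  | m + 1, ref =>
      let ref' := pvShift1 ref
      let cmp := PySem.List.slice ref' (some (-2)) none
      let sh := cmp.filter (fun x => shared.contains x)
      if sh.length = 2 then (true, ref')
      else pvReordLoop shared m ref'

def pvFace_List_Reording (face_list : List (List Int)) (shared : List (List Int)) : Bool × List (List Int) :=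
  pvReordLoop shared face_list.length face_list

def Face_Unification_SubSub (Face_Vertices : List (List Int)) (Triangle_Vertices : List (List Int)) : Bool × List (List Int) :=
  -- tuple(t)/list(e) conversions are identity under the List Int convention
  let shared := PySem.Set.inter (PySem.Set.ofList Face_Vertices) Triangle_Vertices
  if shared.length < 2 then (false, Face_Vertices)
  else
    let fs := (pvFace_List_Reording Face_Vertices shared).2
    let ts := (pvFace_List_Reording Triangle_Vertices shared).2
    -- fs.append(fs[-1]); fs[-2] = ts[0]  (fs, ts nonempty here, so the getD defaults are unreachable)
    let fs2 := fs ++ [(PySem.List.pyGet? fs (-1)).getD []]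
    (true, PySem.List.pySetD fs2 ((fs2.length : Int) - 2) ((PySem.List.pyGet? ts 0).getD []))

-- ===== PORT B =====
-- r = lst[k:] + lst[:k]
def pvRot (lst : List (List Int)) (k : Int) : List (List Int) :=
  PySem.List.slice lst (some k) none ++ PySem.List.slice lst none (some k)

-- tuple(r[-1]) in shared and tuple(r[-2]) in shared
def pvLastTwoShared (shared : PySem.Set (List Int)) (r : List (List Int)) : Bool :=
  ((PySem.List.pyGet? r (-1)).map (fun x => shared.contains x)).getD false &&
  ((PySem.List.pyGet? r (-2)).map (fun x => shared.contains x)).getD false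

-- for k in range(1, n+1): … return r   /   fallback lst[:]
def pvReorder (shared : PySem.Set (List Int)) (lst : List (List Int)) : List (List Int) :=
  match (PySem.List.pyRange 1 ((lst.length : Int) + 1) 1).find?
          (fun k => pvLastTwoShared shared (pvRot lst k)) with
  | some k => pvRot lst k
  | none => lst

def Face_Unification_SubSub_alt (Face_Vertices : List (List Int)) (Triangle_Vertices : List (List Int)) : Bool × List (List Int) :=
  let shared := PySem.Set.inter (PySem.Set.ofList Face_Vertices) (PySem.Set.ofList Triangle_Vertices)
  if shared.length < 2 then (false, Face_Vertices)
  else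
    let f := pvReorder shared Face_Vertices
    let t := pvReorder shared Triangle_Vertices
    -- f[:-1] + [t[0], f[-1]]  (f, t nonempty here, so the getD defaults are unreachable)
    (true, PySem.List.slice f none (some (-1)) ++
           [(PySem.List.pyGet? t 0).getD [], (PySem.List.pyGet? f (-1)).getD []])

-- ===== PRECONDITION & SPEC =====
def Spec_Face_Unification_SubSub (Face_Vertices : List (List Int)) (Triangle_Vertices : List (List Int)) (out : Bool × List (List Int)) : Prop := out = Face_Unification_SubSub_alt Face_Vertices Triangle_Vertices
instance (Face_Vertices : List (List Int)) (Triangle_Vertices : List (List Int)) (out : Bool × List (List Int)) : Decidable (Spec_Face_Unification_SubSub Face_Vertices Triangle_Vertices out) := by unfold Spec_Face_Unification_SubSub; infer_instance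

-- ===== CLAIM (what is proved, stated in full; the proofs are below) =====
def Claim_equal_Face_Unification_SubSub : Prop := ∀ (Face_Vertices : List (List Int)) (Triangle_Vertices : List (List Int)), Dom_Face_Unification_SubSub Face_Vertices Triangle_Vertices → Spec_Face_Unification_SubSub Face_Vertices Triangle_Vertices (Face_Unification_SubSub Face_Vertices Triangle_Vertices)

-- ===== LEMMAS AND PROOFS =====

-- rotation left by j: proof-side normal form of both pvShift1-iteration and pvRot
def pvRotN (lst : List (List Int)) (j : Nat) : List (List Int) :=
  lst.drop j ++ lst.take j

lemma pvRot_natCast (lst : List (List Int)) (k : Nat) : pvRot lst (k : Int) = pvRotN lst k := by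
  simp [pvRot, pvRotN, PySem.List.slice_from_natCast, PySem.List.slice_to_natCast]

lemma pvShift1_rotN (lst : List (List Int)) (j : Nat) (hj : j < lst.length) :
    pvShift1 (pvRotN lst j) = pvRotN lst (j + 1) := by
  have ht : lst.take (j + 1) = lst.take j ++ [lst[j]] := by
    rw [List.take_add_one]
    simp [List.getElem?_eq_getElem hj]
  rw [pvRotN, pvRotN, List.drop_eq_getElem_cons hj, ht, List.cons_append, pvShift1]
  simp

-- A's "len([x for x in ref[-2:] if x in shared]) == 2" test equals B's last-two membership test
lemma pvCheckEq (shared : List (List Int)) (r : List (List Int)) :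
    (((PySem.List.slice r (some (-2)) none).filter (fun x => shared.contains x)).length = 2)
      ↔ pvLastTwoShared shared r = true := by
  rcases r.eq_nil_or_concat with rfl | ⟨l1, c, rfl⟩
  · simp [pvLastTwoShared, PySem.List.pyGet?, PySem.List.pyIdx?, PySem.List.slice]
  · rcases l1.eq_nil_or_concat with rfl | ⟨l, b, rfl⟩
    · by_cases hc : c ∈ shared <;>
        simp [pvLastTwoShared, PySem.List.slice_some_none, PySem.List.pyGet?, PySem.List.pyIdx?, hc]
    · have h1 : PySem.List.pyGet? (l ++ [b, c]) (-1) = some c := by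
        rw [PySem.List.pyGet?_neg_one]; simp
      have h2 : PySem.List.pyGet? (l ++ [b, c]) (-2) = some b := by
        rw [PySem.List.pyGet?_neg_ofNat _ 2 (by omega) (by simp)]
        simp
      have hslice : PySem.List.slice (l ++ [b, c]) (some (-2)) none = [b, c] := by
        rw [PySem.List.slice_from_neg_ofNat _ 2 (by omega)]
        simp
      have hr : (l.concat b).concat c = l ++ [b, c] := by simp
      rw [hr]
      by_cases hb : b ∈ shared <;> by_cases hc : c ∈ shared <;>
        simp [pvLastTwoShared, h1, h2, hslice, hb, hc]

-- the while loop, entered after j of n shifts, is a first-match search over shifts j+1 .. n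
lemma pvLoop_eq_find (shared : List (List Int)) (lst : List (List Int)) :
    ∀ (m j : Nat), j + m = lst.length →
      (pvReordLoop shared m (pvRotN lst j)).2 =
        (match (List.range' (j + 1) m).find?
                (fun k => pvLastTwoShared shared (pvRotN lst k)) with
         | some k => pvRotN lst k
         | none => lst) := by
  intro m
  induction m with
  | zero =>
      intro j hj
      have hj' : j = lst.length := by omega
      subst hj'
      simp [pvReordLoop, pvRotN]
  | succ m ih =>
      intro j hj
      have hjlt : j < lst.length := by omega
      rw [List.range'_succ]
      simp only [pvReordLoop, pvShift1_rotN lst j hjlt, List.find?_cons]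
      cases hchk : pvLastTwoShared shared (pvRotN lst (j + 1)) with
      | false =>
          have hcnd : ¬ (((PySem.List.slice (pvRotN lst (j + 1)) (some (-2)) none).filter
              (fun x => shared.contains x)).length = 2) := by
            rw [pvCheckEq]; simp [hchk]
          rw [if_neg hcnd]
          exact ih (j + 1) (by omega)
      | true =>
          have hcnd : (((PySem.List.slice (pvRotN lst (j + 1)) (some (-2)) none).filter
              (fun x => shared.contains x)).length = 2) := (pvCheckEq _ _).2 hchk
          rw [if_pos hcnd]

-- A's reordering result equals B's
lemma pvReord_eq (shared : List (List Int)) (lst : List (List Int)) :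
    (pvFace_List_Reording lst shared).2 = pvReorder shared lst := by
  have h0 : pvRotN lst 0 = lst := by simp [pvRotN]
  have hmain := pvLoop_eq_find shared lst lst.length 0 (by omega)
  rw [h0] at hmain
  have hrange : PySem.List.pyRange 1 ((lst.length : Int) + 1) 1
      = (List.range lst.length).map (fun k : Nat => (1 : Int) + k) := by
    have harg : ((lst.length : Int) + 1 - 1).toNat = lst.length := by omega
    rw [PySem.List.pyRange_one, harg]
  have hrange' : List.range' 1 lst.length = (List.range lst.length).map (fun k => 1 + k) := by
    rw [List.range'_eq_map_range]
  have hpred : (fun k : Nat => pvLastTwoShared shared (pvRot lst ((1:Int) + k)))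
      = (fun k : Nat => pvLastTwoShared shared (pvRotN lst (1 + k))) := by
    funext k
    have hc : ((1 : Int) + k) = ((1 + k : Nat) : Int) := by push_cast; ring
    rw [hc, pvRot_natCast]
  unfold pvFace_List_Reording pvReorder
  rw [hmain, hrange, hrange', List.find?_map, List.find?_map]
  simp only [Function.comp_def, hpred]
  cases hf : (List.range lst.length).find?
      (fun k => pvLastTwoShared shared (pvRotN lst (1 + k))) with
  | none => rfl
  | some k =>
      simp only [Option.map_some]
      have hc : ((1 : Int) + k) = ((1 + k : Nat) : Int) := by push_cast; ring
      rw [hc, pvRot_natCast]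

lemma pvReorder_length (shared : List (List Int)) (lst : List (List Int)) :
    (pvReorder shared lst).length = lst.length := by
  unfold pvReorder
  cases hf : (PySem.List.pyRange 1 ((lst.length : Int) + 1) 1).find?
      (fun k => pvLastTwoShared shared (pvRot lst k)) with
  | none => rfl
  | some k =>
      have hmem := List.mem_of_find?_eq_some hf
      rw [PySem.List.mem_pyRange_one] at hmem
      obtain ⟨h1, h2⟩ := hmem
      have hk : k = ((k.toNat : Nat) : Int) := by omega
      rw [hk]
      show (pvRot lst ((k.toNat : Nat) : Int)).length = lst.length
      rw [pvRot_natCast]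
      simp [pvRotN]
      omega

-- A's list(set(F).intersection(T)) and B's set(F) & set(T) are the same list
lemma pvShared_eq (F T : List (List Int)) :
    PySem.Set.inter (PySem.Set.ofList F) T
      = PySem.Set.inter (PySem.Set.ofList F) (PySem.Set.ofList T) := by
  unfold PySem.Set.inter
  apply List.filter_congr
  intro x _
  simp [PySem.Set.contains, PySem.Set.mem_ofList]

lemma pvShared_sub_left (F T : List (List Int)) (x : List Int)
    (hx : x ∈ PySem.Set.inter (PySem.Set.ofList F) T) : x ∈ F := by
  unfold PySem.Set.inter at hx
  have := List.mem_of_mem_filter hx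
  rwa [PySem.Set.mem_ofList] at this

lemma pvSet_mid (l : List (List Int)) (a b t0 : List Int) :
    (l ++ [a, b]).set l.length t0 = l ++ [t0, b] := by
  induction l with
  | nil => rfl
  | cons x xs ih => simp [ih]

-- the two merge expressions agree on nonempty f
lemma pvMerge_eq (f t : List (List Int)) (hf : f ≠ []) :
    PySem.List.pySetD (f ++ [(PySem.List.pyGet? f (-1)).getD []])
        (((f ++ [(PySem.List.pyGet? f (-1)).getD []]).length : Int) - 2)
        ((PySem.List.pyGet? t 0).getD [])
      = PySem.List.slice f none (some (-1)) ++
          [(PySem.List.pyGet? t 0).getD [], (PySem.List.pyGet? f (-1)).getD []] := by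
  rcases f.eq_nil_or_concat with rfl | ⟨l, a, rfl⟩
  · exact absurd rfl hf
  · have hconc : l.concat a = l ++ [a] := by simp
    rw [hconc]
    have hlast : PySem.List.pyGet? (l ++ [a]) (-1) = some a :=
      PySem.List.pyGet?_neg_one_append_singleton l a
    have hslice : PySem.List.slice (l ++ [a]) none (some (-1)) = l := by
      rw [PySem.List.slice_to_neg_one]; simp
    rw [hlast, hslice]
    simp only [Option.getD_some]
    have hassoc : (l ++ [a]) ++ [a] = l ++ [a, a] := by simp
    rw [hassoc]
    have hidx : (((l ++ [a, a]).length : Int)) - 2 = ((l.length : Nat) : Int) := by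
      simp
    rw [hidx, PySem.List.pySetD_natCast]
    exact pvSet_mid l a a _

-- ===== VERDICT (by name: the statement is the Claim_ definition above) =====
theorem Face_Unification_SubSub_spec : Claim_equal_Face_Unification_SubSub := by
  intro F T _
  unfold Spec_Face_Unification_SubSub
  unfold Face_Unification_SubSub Face_Unification_SubSub_alt
  rw [← pvShared_eq F T]
  set shared := PySem.Set.inter (PySem.Set.ofList F) T with hsh
  by_cases hlen : shared.length < 2
  · simp [hlen]
  · simp only [hlen, if_neg, not_false_iff]
    have hne : shared ≠ [] := by
      intro h; rw [h] at hlen; simp at hlen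
    obtain ⟨x, hx⟩ := List.exists_mem_of_ne_nil shared hne
    have hF : F ≠ [] := by
      intro h; exact absurd (pvShared_sub_left F T x hx) (by simp [h])
    rw [pvReord_eq shared F, pvReord_eq shared T]
    have hFne : pvReorder shared F ≠ [] := by
      intro h
      have hl := pvReorder_length shared F
      rw [h] at hl
      exact hF (List.eq_nil_of_length_eq_zero hl.symm)
    exact congrArg (Prod.mk true) (pvMerge_eq _ _ hFne)
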